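-- pv_equiv track=rewrite | github.com/kangtae210/leetCode | p_lv2/that_music.py | solution
-- ===== SOURCE A (Python) =====
-- def cal_time(time1, time2):
--     time1 = list(map(int, time1.split(":")))
--     time2 = list(map(int, time2.split(":")))
--
--
--     return (time2[0] - time1[0]) * 60 + (time2[1] - time1[1])
--
-- def sound_to_list(string):
--     answer = []
--     for i in range(len(string)):
--         if string[i] == "#":
--             answer[-1] = answer[-1].lower()
--         else:
--             answer.append(string[i])
--     return answer
--
-- def solution(m, musicinfos):
--     m = sound_to_list(m)
--     m = "".join(m)
--     answers = []
--
--     for i in range(len(musicinfos)):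
--         # 한 음악당 배열 원소 하나로 변환
--         musicinfos[i] = musicinfos[i].split(",")
--         # 재생시간을 계산하여 분 단위로 표시, 기존의 재생시작 - 재생끝 정보는 제거
--         musicinfos[i].append(cal_time(musicinfos[i][0], musicinfos[i][1]))
--         musicinfos[i] = musicinfos[i][2:5]
--
--         # 재생시간만큼 음들을 반복
--         # 'ABC'를 16분만큼 재생시 'ABC" * 5 + 'A' 와 같이 변환
--         musicinfos[i][1] = sound_to_list(musicinfos[i][1])
--         multiple = musicinfos[i][2] // len(musicinfos[i][1])
--         plus = musicinfos[i][2] % len(musicinfos[i][1])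
--         musicinfos[i][1] = musicinfos[i][1] * multiple + musicinfos[i][1][:plus]
--         musicinfos[i][1] = "".join(musicinfos[i][1])
--
--         # 들을 음 m이 재생된 음들에 있다면 곡 제목과 재생시각을 answer 배열에 추가
--         if m in musicinfos[i][1]:
--             answers.append([musicinfos[i][0], musicinfos[i][2]])
--
--
--     # answer 배열이 비어있다면 none을 반환
--     # 그렇지 않다면 재생시각순으로 정렬해서 첫번째 곡의 제목 반환
--     if len(answers) == 0:
--         return  "(None)"
--     answers.sort(key= lambda x:-x[1])
--     return answers[0][0]
-- ===== SOURCE B (Python) =====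
-- def _norm(s):
--     # drop the '#'s; a character whose successor is '#' is lowercased
--     return "".join(c.lower() if n == "#" else c
--                    for c, n in zip(s, s[1:] + " ") if c != "#")
--
--
-- def _minutes(t):
--     h, mi = t.split(":")[:2]
--     return int(h) * 60 + int(mi)
--
--
-- def _consider(key, best, info):
--     # one music entry: update the running best (play_time, title)
--     start, end, title, mel = info.split(",")
--     t = _minutes(end) - _minutes(start)
--     tune = _norm(mel)
--     q, r = divmod(t, len(tune))
--     if key in tune * q + tune[:r]:
--         if best is None or t > best[0]:
--             return (t, title)
--     return best
--
--
-- def solution(m, musicinfos):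
--     # B: running-best scan (strict '>' keeps the earliest maximum) instead of
--     # A's mutate/collect/sort pipeline; B does not mutate musicinfos.
--     key = _norm(m)
--     best = None
--     for info in musicinfos:
--         best = _consider(key, best, info)
--     return best[1] if best else "(None)"
-- ===== Notes on version B (the rewrite author's own statement) =====
-- stated objective: simpler
-- what changed: B replaces A's mutate-in-place/collect-all-matches/sort-by-negative-time pipeline with a single running-best scan (strict '>' reproduces the stable sort's earliest-max tie-break) and replaces the mutating sharp-folding loop by a filtered lookahead comprehension pairing each character with its successor; A mutates musicinfos in place, B does not, so the equivalence is about the return value only.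
import Mathlib
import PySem

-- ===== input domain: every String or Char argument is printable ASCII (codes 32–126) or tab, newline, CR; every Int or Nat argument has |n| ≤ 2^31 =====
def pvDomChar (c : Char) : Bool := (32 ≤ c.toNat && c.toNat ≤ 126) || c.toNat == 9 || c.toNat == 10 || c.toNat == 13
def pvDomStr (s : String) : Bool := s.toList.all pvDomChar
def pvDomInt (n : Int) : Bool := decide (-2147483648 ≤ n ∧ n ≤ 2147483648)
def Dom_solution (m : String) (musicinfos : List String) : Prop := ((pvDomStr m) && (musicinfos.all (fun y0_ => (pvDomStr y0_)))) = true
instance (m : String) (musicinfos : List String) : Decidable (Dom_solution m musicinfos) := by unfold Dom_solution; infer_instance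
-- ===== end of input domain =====

-- B keeps a single running best instead of A's collect-then-sort, and normalizes sharps by a
-- lookahead comprehension instead of A's mutate-the-last-element loop; A mutates musicinfos in
-- place, B does not: the equivalence proved here is about the RETURN value only.

-- ===== PORT A =====

-- cal_time: split on ':', map int over ALL pieces (Pre_ demands each parses), use pieces 0 and 1
def calTime (time1 time2 : String) : Int :=
  let t1 := ((PySem.Str.split? time1 ":").getD []).map (fun s => (PySem.Int.ofStr? s).getD 0)
  let t2 := ((PySem.Str.split? time2 ":").getD []).map (fun s => (PySem.Int.ofStr? s).getD 0)
  (PySem.List.pyGetD t2 0 0 - PySem.List.pyGetD t1 0 0) * 60 +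
    (PySem.List.pyGetD t2 1 0 - PySem.List.pyGetD t1 1 0)

-- sound_to_list: the accumulator is kept REVERSED, so answer[-1] = answer[-1].lower() is lowering
-- the head; Python's IndexError on a leading '#' (empty answer) is excluded by Pre_ (the [] branch
-- is junk there)
def soundToList (cs : List Char) : List Char :=
  (cs.foldl (fun acc c =>
      if c = '#' then
        match acc with
        | [] => []
        | h :: t => PySem.Chars.lowerChar h :: t
      else c :: acc) []).reverse

-- one music string, exactly A's per-iteration body (Python stores [title, melody, time] back into
-- the mutated heterogeneous list; here the three values are read from the split directly — same
-- values).  Python's 'mel * multiple' with multiple ≤ 0 is [] — replicate mult.toNat is exact;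
-- mel[:plus] with plus = t % len ≥ 0 is take.  Division by len = 0 (empty melody) raises in
-- Python and is excluded by Pre_.
def matchInfo (mm : List Char) (info : String) : Option (String × Int) :=
  let parts := (PySem.Str.split? info ",").getD []
  let t := calTime (PySem.List.pyGetD parts 0 "") (PySem.List.pyGetD parts 1 "")
  let title := PySem.List.pyGetD parts 2 ""
  let mel := soundToList (PySem.List.pyGetD parts 3 "").toList
  let mult := PySem.Int.floordiv t (mel.length : Int)
  let plus := PySem.Int.mod t (mel.length : Int)
  let played := (List.replicate mult.toNat mel).flatten ++ mel.take plus.toNat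
  if PySem.Chars.isIn mm played then some (title, t) else none

def solution (m : String) (musicinfos : List String) : String :=
  let mm := soundToList m.toList
  let answers := musicinfos.foldl
    (fun acc info =>
      match matchInfo mm info with
      | some p => acc ++ [p]
      | none => acc) []
  if answers.length = 0 then "(None)"
  else (PySem.List.pyGetD (PySem.List.sorted answers (fun p => (-p.2 : Int)) false) 0 ("", 0)).1

-- ===== PORT B =====

-- Source B's norm: pair every character with its successor (sentinel ' '), drop the '#'s, lowercase a
-- character whose successor is '#'
def normB (cs : List Char) : List Char :=
  ((cs.zip (cs.drop 1 ++ [' '])).filter (fun p => p.1 != '#')).map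
    (fun p => if p.2 = '#' then PySem.Chars.lowerChar p.1 else p.1)

-- Source B's minutes: int of the first two ':'-pieces (Python unpacks exactly two; Pre_ guarantees ≥ 2
-- pieces, both parseable — the getD defaults are junk outside Pre_)
def minutesB (t : String) : Int :=
  let ps := (PySem.Str.split? t ":").getD []
  ((PySem.Int.ofStr? (ps.getD 0 "")).getD 0) * 60 + ((PySem.Int.ofStr? (ps.getD 1 "")).getD 0)

-- Source B's _consider: unpack the 4 comma-pieces (Python raises on any other arity; Pre_ excludes
-- that — the catch-all branch is junk there), update the running best (time, title), strict '>'
def considerB (key : List Char) (best : Option (Int × String)) (info : String) :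
    Option (Int × String) :=
  match (PySem.Str.split? info ",").getD [] with
  | [start, stop, title, mel] =>
    let t := minutesB stop - minutesB start
    let tune := normB mel.toList
    let q := PySem.Int.floordiv t (tune.length : Int)
    let r := PySem.Int.mod t (tune.length : Int)
    if PySem.Chars.isIn key ((List.replicate q.toNat tune).flatten ++ tune.take r.toNat) then
      match best with
      | none => some (t, title)
      | some b => if t > b.1 then some (t, title) else best
    else best
  | _ => best

-- Source B's loop: fold the running best over the music entries
def solution_alt (m : String) (musicinfos : List String) : String :=
  let key := normB m.toList
  let best := musicinfos.foldl (considerB key) none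
  match best with
  | none => "(None)"
  | some b => b.2

-- ===== PRECONDITION & SPEC =====
-- Pre_ = exactly the inputs on which Python A returns: m does not start with '#' (IndexError in
-- sound_to_list), and every music info splits on ',' into exactly 4 parts whose two time fields
-- each split on ':' into ≥ 2 pieces all parseable by int() (IndexError/TypeError/ValueError
-- otherwise), with a melody that is nonempty (ZeroDivisionError) and does not start with '#'.
def Pre_solution (m : String) (musicinfos : List String) : Prop :=
  PySem.Str.startswith m "#" = false ∧
  ∀ info ∈ musicinfos,
    (((PySem.Str.split? info ",").getD []).length = 4 ∧
     (∀ ts ∈ [((PySem.Str.split? info ",").getD []).getD 0 "",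
              ((PySem.Str.split? info ",").getD []).getD 1 ""],
        2 ≤ ((PySem.Str.split? ts ":").getD []).length ∧
        ∀ c ∈ (PySem.Str.split? ts ":").getD [], (PySem.Int.ofStr? c).isSome) ∧
     ((PySem.Str.split? info ",").getD []).getD 3 "" ≠ "" ∧
     PySem.Str.startswith (((PySem.Str.split? info ",").getD []).getD 3 "") "#" = false)
instance (m : String) (musicinfos : List String) : Decidable (Pre_solution m musicinfos) := by
  unfold Pre_solution; infer_instance

def pvWitness_solution : String × List String := ("ABC", ["10:00,10:03,WORLD,ABCD"])

def Spec_solution (m : String) (musicinfos : List String) (out : String) : Prop := out = solution_alt m musicinfos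
instance (m : String) (musicinfos : List String) (out : String) : Decidable (Spec_solution m musicinfos out) := by unfold Spec_solution; infer_instance

-- ===== CLAIM (what is proved, stated in full; the proofs are below) =====
def Claim_equal_solution : Prop := ∀ (m : String) (musicinfos : List String), Dom_solution m musicinfos → Pre_solution m musicinfos → Spec_solution m musicinfos (solution m musicinfos)

-- ===== LEMMAS AND PROOFS =====

-- ---- Char facts: lowering is idempotent and never produces '#'
theorem pvCharLe (a b : Char) : a ≤ b ↔ a.toNat ≤ b.toNat := by
  rw [Char.le_def, Char.toNat, Char.toNat, UInt32.le_iff_toNat_le]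

theorem pvLowerSpec (c : Char) :
    PySem.Chars.lowerChar c = if 65 ≤ c.toNat ∧ c.toNat ≤ 90 then Char.ofNat (c.toNat + 32) else c := by
  rw [PySem.Chars.lowerChar, PySem.Chars.isupper]
  congr 1
  simp [pvCharLe]

theorem pvToNatOfNat (n : Nat) (h : 97 ≤ n) (h2 : n ≤ 122) : (Char.ofNat n).toNat = n := by
  rw [Char.toNat_ofNat, if_pos]
  exact Or.inl (by omega)

theorem lower_idem (c : Char) : PySem.Chars.lowerChar (PySem.Chars.lowerChar c) = PySem.Chars.lowerChar c := by
  rw [pvLowerSpec c]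
  split_ifs with h1
  · rw [pvLowerSpec, if_neg (by rw [pvToNatOfNat _ (by omega) (by omega)]; omega)]
  · rw [pvLowerSpec, if_neg h1]

theorem lower_ne_hash (c : Char) (h : c ≠ '#') : PySem.Chars.lowerChar c ≠ '#' := by
  rw [pvLowerSpec]
  split_ifs with h1
  · intro he
    have hv := pvToNatOfNat (c.toNat + 32) (by omega) (by omega)
    rw [he] at hv
    simp at hv
    omega
  · exact h

-- ---- normB ≡ soundToList on '#'-free-headed input
theorem normB_cons (c : Char) (cs : List Char) :
    normB (c :: cs) =
      (if c = '#' then [] else [if cs.headD ' ' = '#' then PySem.Chars.lowerChar c else c])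
        ++ normB cs := by
  cases cs <;> simp [normB] <;> split_ifs <;> simp_all

-- pending-last-character view of A's sound_to_list loop
def procFrom : Char → List Char → List Char
  | h, [] => [h]
  | h, c :: r => if c = '#' then procFrom (PySem.Chars.lowerChar h) r else h :: procFrom c r

theorem procFrom_eq_normB (cs : List Char) :
    (∀ h, h ≠ '#' → procFrom h cs = normB (h :: cs)) ∧
    (∀ g, g ≠ '#' → PySem.Chars.lowerChar g = g → procFrom g cs = g :: normB cs) := by
  induction cs with
  | nil =>
    constructor
    · intro h hne
      rw [normB_cons, if_neg hne]
      simp [procFrom, normB]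
    · intro g _ _; simp [procFrom, normB]
  | cons c r ih =>
    constructor
    · intro h hne
      rw [normB_cons, if_neg hne]
      by_cases hc : c = '#'
      · subst hc
        rw [procFrom]
        simp only [reduceIte]
        rw [(ih.2 (PySem.Chars.lowerChar h) (lower_ne_hash h hne) (lower_idem h))]
        rw [normB_cons, if_pos rfl]
        simp
      · rw [procFrom, if_neg hc, ih.1 c hc, normB_cons, if_neg hc]
        simp [hc]
    · intro g hg hidem
      by_cases hc : c = '#'
      · subst hc
        rw [procFrom]
        simp only [reduceIte]
        rw [hidem, ih.2 g hg hidem, normB_cons]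
        simp
      · rw [procFrom, if_neg hc, ih.1 c hc]

theorem fold_eq_procFrom (cs : List Char) :
    ∀ (h : Char) (t : List Char),
      (cs.foldl (fun acc c =>
          if c = '#' then
            match acc with
            | [] => []
            | h :: t => PySem.Chars.lowerChar h :: t
          else c :: acc) (h :: t)).reverse = t.reverse ++ procFrom h cs := by
  induction cs with
  | nil => intro h t; simp [procFrom]
  | cons c r ih =>
    intro h t
    by_cases hc : c = '#'
    · subst hc
      simp only [List.foldl_cons, reduceIte]
      rw [ih, procFrom]
      simp only [reduceIte]
    · simp only [List.foldl_cons, if_neg hc]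
      rw [ih, procFrom, if_neg hc]
      simp

theorem soundToList_eq_normB (cs : List Char) (h : cs.head? ≠ some '#') :
    soundToList cs = normB cs := by
  cases cs with
  | nil => rfl
  | cons c r =>
    have hc : c ≠ '#' := by intro he; exact h (by subst he; rfl)
    unfold soundToList
    simp only [List.foldl_cons, if_neg hc]
    rw [fold_eq_procFrom r c []]
    simpa using (procFrom_eq_normB r).1 c hc

theorem startswith_hash_head (s : String) (h : PySem.Str.startswith s "#" = false) :
    s.toList.head? ≠ some '#' := by
  have hs : PySem.Chars.startswith s.toList ['#'] = false := by
    have hb : ("#" : String).toList = ['#'] := rfl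
    rw [← hb, ← PySem.Str.startswith_eq]
    exact h
  cases hl : s.toList with
  | nil => simp
  | cons c r =>
    rw [hl] at hs
    simp [PySem.Chars.startswith, List.isPrefixOf] at hs
    simp [eq_comm] at hs ⊢
    simpa [eq_comm] using hs

-- ---- times: A's (h2-h1)*60+(m2-m1) over the full int-mapped split = B's minutes difference
theorem calTime_eq (t1 t2 : String) : calTime t1 t2 = minutesB t2 - minutesB t1 := by
  unfold calTime minutesB
  rcases (PySem.Str.split? t1 ":").getD [] with _ | ⟨a1, l1⟩ <;>
    rcases (PySem.Str.split? t2 ":").getD [] with _ | ⟨a2, l2⟩ <;>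
      [skip; rcases l2 with _ | ⟨b2, l2⟩; rcases l1 with _ | ⟨b1, l1⟩;
       rcases l1 with _ | ⟨b1, l1⟩ <;> rcases l2 with _ | ⟨b2, l2⟩] <;>
    simp [PySem.List.pyGetD_ofNat', show PySem.Int.ofStr? "" = none from by decide] <;> ring

-- named best-update functions (proof helpers)
def updSwap (b : Option (Int × String)) (p : String × Int) : Option (Int × String) :=
  match b with
  | none => some (p.2, p.1)
  | some q => if p.2 > q.1 then some (p.2, p.1) else b

def updBest (best : Option (String × Int)) (hit : String × Int) : Option (String × Int) :=
  match best with
  | none => some hit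
  | some q => if hit.2 > q.2 then some hit else some q

-- ---- A's collecting loop is a filterMap
theorem foldl_collect_eq_filterMap (f : String → Option (String × Int)) :
    ∀ (l : List String) (acc : List (String × Int)),
      l.foldl (fun acc info =>
          match f info with
          | some p => acc ++ [p]
          | none => acc) acc = acc ++ l.filterMap f := by
  intro l
  induction l with
  | nil => intro acc; simp
  | cons x xs ih =>
    intro acc
    cases h : f x <;> simp [List.foldl_cons, h, ih]

-- running best over swapped (time, title) hits = swap of running best over (title, time) hits
theorem best_swap :
    ∀ (hits : List (String × Int)) (b : Option (String × Int)),
      hits.foldl updSwap (b.map Prod.swap) = (hits.foldl updBest b).map Prod.swap := by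
  intro hits
  induction hits with
  | nil => intro b; simp
  | cons p rest ih =>
    intro b
    rw [List.foldl_cons, List.foldl_cons, ← ih]
    congr 1
    cases b with
    | none => rfl
    | some q => by_cases hq : p.2 > q.2 <;> simp [updSwap, updBest, Prod.swap, hq]

theorem head?_insertBy (before : (String × Int) → (String × Int) → Bool)
    (x : String × Int) (ys : List (String × Int)) :
    (PySem.List.insertBy before x ys).head? =
      some (match ys with
            | [] => x
            | h :: _ => if before x h then x else h) := by
  cases ys with
  | nil => simp [PySem.List.insertBy]
  | cons h t =>
    by_cases hb : before x h = true <;> simp [PySem.List.insertBy, hb]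

-- head of the stable insertion sort by key (-time) = running strict max (earliest maximum)
theorem head?_foldl_insertBy :
    ∀ (l : List (String × Int)) (acc : List (String × Int)),
      (l.foldl (fun acc x =>
          PySem.List.insertBy (fun a b => decide ((-a.2 : Int) < -b.2)) x acc) acc).head?
      = l.foldl updBest acc.head? := by
  intro l
  induction l with
  | nil => intro acc; simp
  | cons x xs ih =>
    intro acc
    rw [List.foldl_cons, List.foldl_cons, ih]
    congr 1
    cases acc with
    | nil => simp [PySem.List.insertBy, updBest]
    | cons h t =>
      rw [head?_insertBy]
      have : ((-x.2 : Int) < -h.2) ↔ (x.2 > h.2) := by omega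
      by_cases hx : x.2 > h.2
      · simp [updBest, hx, this.mpr hx]
      · simp [updBest, hx, (not_iff_not.mpr this).mpr hx]

-- the core of the A side: first title after the stable sort = title of the running strict max
theorem sorted_first_eq_best (l : List (String × Int)) :
    (if l.length = 0 then "(None)"
     else (PySem.List.pyGetD (PySem.List.sorted l (fun p => (-p.2 : Int)) false) 0 ("", 0)).1)
    = (match l.foldl updBest none with
       | none => "(None)"
       | some q => q.1) := by
  have hh : (PySem.List.sorted l (fun p => (-p.2 : Int)) false).head?
      = l.foldl updBest none := by
    rw [PySem.List.sorted_eq_foldl_insertBy, head?_foldl_insertBy]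
    rfl
  rcases l with _ | ⟨a, as⟩
  · rfl
  · have hsne : PySem.List.sorted (a :: as) (fun p => (-p.2 : Int)) false ≠ [] := by
      simp [PySem.List.sorted_eq_nil_iff]
    obtain ⟨h0, t0, hs⟩ := List.exists_cons_of_ne_nil hsne
    rw [hs] at hh
    rw [List.head?_cons] at hh
    have hlen : ¬ ((a :: as).length = 0) := by simp
    rw [if_neg hlen, hs, PySem.List.pyGetD_zero_cons, ← hh]


theorem pvLen4 {α : Type} (l : List α) (h : l.length = 4) : ∃ a b c d, l = [a, b, c, d] := by
  rcases l with _ | ⟨a, _ | ⟨b, _ | ⟨c, _ | ⟨d, _ | ⟨e, t⟩⟩⟩⟩⟩ <;>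
    first
    | exact ⟨a, b, c, d, rfl⟩
    | simp at h

-- B's per-music step, under Pre_'s per-info condition, is exactly "matchInfo then update best"
theorem stepB_eq (mm : List Char) (info : String)
    (h4 : ((PySem.Str.split? info ",").getD []).length = 4)
    (_hmel : ((PySem.Str.split? info ",").getD []).getD 3 "" ≠ "")
    (hsh : PySem.Str.startswith (((PySem.Str.split? info ",").getD []).getD 3 "") "#" = false)
    (b : Option (Int × String)) :
    considerB mm b info = (matchInfo mm info).elim b (updSwap b) := by
  obtain ⟨pa, pb, pc, pd, hps⟩ := pvLen4 _ h4
  unfold considerB matchInfo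
  rw [hps]
  rw [hps] at hsh
  have hget0 : PySem.List.pyGetD [pa, pb, pc, pd] (0 : Int) "" = pa := by
    simp [PySem.List.pyGetD_ofNat']
  have hget1 : PySem.List.pyGetD [pa, pb, pc, pd] (1 : Int) "" = pb := by
    simp [PySem.List.pyGetD_ofNat']
  have hget2 : PySem.List.pyGetD [pa, pb, pc, pd] (2 : Int) "" = pc := by
    simp [PySem.List.pyGetD_ofNat']
  have hget3 : PySem.List.pyGetD [pa, pb, pc, pd] (3 : Int) "" = pd := by
    simp [PySem.List.pyGetD_ofNat']
  have hd : pd.toList.head? ≠ some '#' := startswith_hash_head pd (by simpa using hsh)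
  simp only [hget0, hget1, hget2, hget3, calTime_eq, soundToList_eq_normB pd.toList hd]
  by_cases hin : PySem.Chars.isIn mm
      ((List.replicate (PySem.Int.floordiv (minutesB pb - minutesB pa)
          ((normB pd.toList).length : Int)).toNat (normB pd.toList)).flatten ++
        (normB pd.toList).take (PySem.Int.mod (minutesB pb - minutesB pa)
          ((normB pd.toList).length : Int)).toNat) = true <;>
    simp only [hin, if_true, if_false, Bool.false_eq_true, Option.elim_some, Option.elim_none] <;> rfl

-- B's loop folds considerB; on Pre_-conformant entries that is the best-fold over the hits
theorem foldB_filterMap (mm : List Char) :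
    ∀ (l : List String),
      (∀ info ∈ l,
        ((PySem.Str.split? info ",").getD []).length = 4 ∧
        ((PySem.Str.split? info ",").getD []).getD 3 "" ≠ "" ∧
        PySem.Str.startswith (((PySem.Str.split? info ",").getD []).getD 3 "") "#" = false) →
      ∀ b, l.foldl (considerB mm) b = (l.filterMap (matchInfo mm)).foldl updSwap b := by
  intro l
  induction l with
  | nil => intro _ b; simp
  | cons x xs ih =>
    intro hpre b
    obtain ⟨h4, hmel, hsh⟩ := hpre x (by simp)
    rw [List.foldl_cons, stepB_eq mm x h4 hmel hsh b]
    cases h : matchInfo mm x <;>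
      simp [h, ih (fun i hi => hpre i (by simp [hi]))]

-- ===== VERDICT (by name: the statement is the Claim_ definition above) =====
set_option maxHeartbeats 1000000 in
theorem solution_spec : Claim_equal_solution := by
  intro m infos _ hpre
  unfold Spec_solution
  obtain ⟨hm, hinfo⟩ := hpre
  simp only [solution, solution_alt]
  rw [(soundToList_eq_normB m.toList (startswith_hash_head m hm)).symm]
  rw [foldl_collect_eq_filterMap (matchInfo (soundToList m.toList)) infos []]
  rw [foldB_filterMap (soundToList m.toList) infos
        (fun info hi =>
          ⟨(hinfo info hi).1, (hinfo info hi).2.2.1, (hinfo info hi).2.2.2⟩) none]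
  have hb := best_swap (infos.filterMap (matchInfo (soundToList m.toList))) none
  simp only [Option.map_none] at hb
  have hcore := sorted_first_eq_best (infos.filterMap (matchInfo (soundToList m.toList)))
  simp only [List.nil_append]
  rw [hcore, hb]
  cases (infos.filterMap (matchInfo (soundToList m.toList))).foldl updBest none with
  | none => rfl
  | some q => rfl
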